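-- pv_equiv track=rewrite | github.com/ManziPatrick/id_verification | id_card_processor.py | extract_biometric_info
-- ===== SOURCE A (Python) =====
-- from typing import Optional, Dict, Any, List
--
-- def extract_biometric_info(lines: List[str]) -> Dict[str, str]:
--     """Extract biometric information like fingerprint references"""
--     biometric_data = {
--         "fingerprint_type": "",
--         "thumb_reference": ""
--     }
--
--     for line in lines:
--         line_upper = line.upper().strip()
--         if "THUMB" in line_upper:
--             biometric_data["fingerprint_type"] = line.strip()
--             if "RIGHT" in line_upper:
--                 biometric_data["thumb_reference"] = "RIGHT_THUMB"
--             elif "LEFT" in line_upper: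
--                 biometric_data["thumb_reference"] = "LEFT_THUMB"
--
--     return biometric_data
-- ===== SOURCE B (Python) =====
-- from typing import Dict, List
--
--
-- def extract_biometric_info(lines: List[str]) -> Dict[str, str]:
--     """Extract biometric information like fingerprint references"""
--     # Field 1: last line containing THUMB (case-insensitive), stripped.
--     fingerprint_type = ""
--     for line in reversed(lines):
--         if "THUMB" in line.upper().strip():
--             fingerprint_type = line.strip()
--             break
--
--     # Field 2: last THUMB line that also names a side; RIGHT wins within a line.
--     thumb_reference = ""
--     for line in reversed(lines):
--         u = line.upper().strip()
--         if "THUMB" in u and ("RIGHT" in u or "LEFT" in u):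
--             thumb_reference = "RIGHT_THUMB" if "RIGHT" in u else "LEFT_THUMB"
--             break
--
--     return {"fingerprint_type": fingerprint_type, "thumb_reference": thumb_reference}
-- ===== Notes on version B (the rewrite author's own statement) =====
-- stated objective: alternative
-- what changed: Replaced A's single forward fold that mutates both dict fields together with two independent reversed first-match scans (one per field: last THUMB line for fingerprint_type; last THUMB line naming a side for thumb_reference), assembling the dict from the two results.
import Mathlib
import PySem

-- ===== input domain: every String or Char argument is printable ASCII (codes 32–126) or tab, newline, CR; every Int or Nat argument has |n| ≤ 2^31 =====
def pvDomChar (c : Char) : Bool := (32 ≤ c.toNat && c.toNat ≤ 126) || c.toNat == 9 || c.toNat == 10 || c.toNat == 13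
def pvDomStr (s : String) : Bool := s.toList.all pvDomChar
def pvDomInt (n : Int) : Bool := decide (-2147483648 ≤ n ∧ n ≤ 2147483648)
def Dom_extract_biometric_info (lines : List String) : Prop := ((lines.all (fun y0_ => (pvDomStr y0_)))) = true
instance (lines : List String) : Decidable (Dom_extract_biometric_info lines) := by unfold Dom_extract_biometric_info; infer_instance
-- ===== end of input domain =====

-- B computes the two dict fields by two independent reversed first-match scans instead of
-- A's single forward fold mutating a dict (objective: alternative decomposition, same cost).

-- ===== PORT A =====
def extract_biometric_info (lines : List String) : List (String × String) :=
  let biometric_data : PySem.Dict String String :=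
    PySem.Dict.ofList [("fingerprint_type", ""), ("thumb_reference", "")]
  (lines.foldl (fun d line =>
    let line_upper := PySem.Str.strip (PySem.Str.upper line)
    if PySem.Str.isIn "THUMB" line_upper then
      let d := d.insert "fingerprint_type" (PySem.Str.strip line)
      if PySem.Str.isIn "RIGHT" line_upper then
        d.insert "thumb_reference" "RIGHT_THUMB"
      else if PySem.Str.isIn "LEFT" line_upper then
        d.insert "thumb_reference" "LEFT_THUMB"
      else d
    else d) biometric_data).items

-- ===== PORT B =====
def extract_biometric_info_alt (lines : List String) : List (String × String) :=
  let fingerprint_type :=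
    match lines.reverse.find? (fun line =>
        PySem.Str.isIn "THUMB" (PySem.Str.strip (PySem.Str.upper line))) with
    | some line => PySem.Str.strip line
    | none => ""
  let thumb_reference :=
    match lines.reverse.find? (fun line =>
        let u := PySem.Str.strip (PySem.Str.upper line)
        PySem.Str.isIn "THUMB" u && (PySem.Str.isIn "RIGHT" u || PySem.Str.isIn "LEFT" u)) with
    | some line =>
        if PySem.Str.isIn "RIGHT" (PySem.Str.strip (PySem.Str.upper line)) then "RIGHT_THUMB"
        else "LEFT_THUMB"
    | none => ""
  [("fingerprint_type", fingerprint_type), ("thumb_reference", thumb_reference)]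

-- ===== PRECONDITION & SPEC =====
def Spec_extract_biometric_info (lines : List String) (out : List (String × String)) : Prop := out = extract_biometric_info_alt lines
instance (lines : List String) (out : List (String × String)) : Decidable (Spec_extract_biometric_info lines out) := by unfold Spec_extract_biometric_info; infer_instance

-- ===== CLAIM (what is proved, stated in full; the proofs are below) =====
def Claim_equal_extract_biometric_info : Prop := ∀ (lines : List String), Dom_extract_biometric_info lines → Spec_extract_biometric_info lines (extract_biometric_info lines)


-- ===== LEMMAS AND PROOFS =====

-- A loop 'if p then s := v line' keeps the LAST matching line, i.e. the first match of the reversed list.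
theorem foldl_if_last (p : String → Bool) (v : String → String) :
    ∀ (lines : List String) (a : String),
      lines.foldl (fun s ln => if p ln then v ln else s) a =
        (match lines.reverse.find? p with
         | some ln => v ln
         | none => a) := by
  intro lines
  induction lines with
  | nil => intro a; simp
  | cons hd tl ih =>
      intro a
      simp only [List.foldl_cons, List.reverse_cons, List.find?_append]
      rw [ih]
      cases h : tl.reverse.find? p with
      | some ln => simp
      | none =>
          simp only [Option.none_or]
          by_cases hp : p hd = true <;> simp [hp, List.find?]

theorem insert2_fp (a b v : String) :
    (PySem.Dict.mk [("fingerprint_type", a), ("thumb_reference", b)]).insert "fingerprint_type" v =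
      PySem.Dict.mk [("fingerprint_type", v), ("thumb_reference", b)] := by
  apply PySem.Dict.ext
  rw [PySem.Dict.items_insert]
  simp

theorem insert2_tr (a b v : String) :
    (PySem.Dict.mk [("fingerprint_type", a), ("thumb_reference", b)]).insert "thumb_reference" v =
      PySem.Dict.mk [("fingerprint_type", a), ("thumb_reference", v)] := by
  apply PySem.Dict.ext
  rw [PySem.Dict.items_insert]
  simp

-- A's fused fold over the two-key dict is the pair of the two independent one-field folds.
theorem foldA_split (lines : List String) :
    ∀ (a b : String),
      (lines.foldl (fun d line =>
        if PySem.Str.isIn "THUMB" (PySem.Str.strip (PySem.Str.upper line)) then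
          if PySem.Str.isIn "RIGHT" (PySem.Str.strip (PySem.Str.upper line)) then
            (d.insert "fingerprint_type" (PySem.Str.strip line)).insert "thumb_reference" "RIGHT_THUMB"
          else if PySem.Str.isIn "LEFT" (PySem.Str.strip (PySem.Str.upper line)) then
            (d.insert "fingerprint_type" (PySem.Str.strip line)).insert "thumb_reference" "LEFT_THUMB"
          else d.insert "fingerprint_type" (PySem.Str.strip line)
        else d) (PySem.Dict.mk [("fingerprint_type", a), ("thumb_reference", b)])) =
      PySem.Dict.mk
        [("fingerprint_type", lines.foldl (fun s ln =>
            if PySem.Str.isIn "THUMB" (PySem.Str.strip (PySem.Str.upper ln)) then PySem.Str.strip ln else s) a),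
         ("thumb_reference", lines.foldl (fun s ln =>
            if (PySem.Str.isIn "THUMB" (PySem.Str.strip (PySem.Str.upper ln)) &&
                (PySem.Str.isIn "RIGHT" (PySem.Str.strip (PySem.Str.upper ln)) ||
                 PySem.Str.isIn "LEFT" (PySem.Str.strip (PySem.Str.upper ln)))) then
              (if PySem.Str.isIn "RIGHT" (PySem.Str.strip (PySem.Str.upper ln)) then "RIGHT_THUMB" else "LEFT_THUMB")
            else s) b)] := by
  induction lines with
  | nil => intro a b; rfl
  | cons hd tl ih =>
      intro a b
      simp only [List.foldl_cons]
      by_cases hT : PySem.Str.isIn "THUMB" (PySem.Str.strip (PySem.Str.upper hd)) = true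
      · by_cases hR : PySem.Str.isIn "RIGHT" (PySem.Str.strip (PySem.Str.upper hd)) = true
        · rw [if_pos hT, if_pos hR, insert2_fp, insert2_tr, ih]
          simp at hT hR
          simp [hT, hR]
        · by_cases hL : PySem.Str.isIn "LEFT" (PySem.Str.strip (PySem.Str.upper hd)) = true
          · rw [if_pos hT, if_neg hR, if_pos hL, insert2_fp, insert2_tr, ih]
            simp at hT hR hL
            simp [hT, hR, hL]
          · rw [if_pos hT, if_neg hR, if_neg hL, insert2_fp, ih]
            simp at hT hR hL
            simp [hT, hR, hL]
      · rw [if_neg hT, ih]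
        simp at hT
        simp [hT]

-- ===== VERDICT (by name: the statement is the Claim_ definition above) =====
theorem extract_biometric_info_spec : Claim_equal_extract_biometric_info := by
  intro lines _
  unfold Spec_extract_biometric_info
  show (lines.foldl (fun d line =>
        if PySem.Str.isIn "THUMB" (PySem.Str.strip (PySem.Str.upper line)) then
          if PySem.Str.isIn "RIGHT" (PySem.Str.strip (PySem.Str.upper line)) then
            (d.insert "fingerprint_type" (PySem.Str.strip line)).insert "thumb_reference" "RIGHT_THUMB"
          else if PySem.Str.isIn "LEFT" (PySem.Str.strip (PySem.Str.upper line)) then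
            (d.insert "fingerprint_type" (PySem.Str.strip line)).insert "thumb_reference" "LEFT_THUMB"
          else d.insert "fingerprint_type" (PySem.Str.strip line)
        else d) (PySem.Dict.mk [("fingerprint_type", ""), ("thumb_reference", "")])).items =
      extract_biometric_info_alt lines
  rw [foldA_split lines "" "", foldl_if_last, foldl_if_last]
  rfl
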